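-- pv_equiv track=rewrite | github.com/6desislava6/Hack-Bulgaria | Hack-first-week/Wednesday/contains_digits.py | contains_digits
-- ===== SOURCE A (Python) =====
-- def contains_digits(number, digits):
-- 	number_digits = []
-- 	all_in = True
-- 	while number > 0:
-- 		number_digits.append(number%10)
-- 		number = number // 10
-- 	for digit in digits:
-- 		if digit not in number_digits:
-- 			all_in = False
-- 			break
-- 	return all_in
-- ===== SOURCE B (Python) =====
-- def contains_digits(number, digits):
--     needed = set(digits)
--     while number > 0 and needed:
--         needed.discard(number % 10)
--         number //= 10
--     return not needed
-- ===== Notes on version B (the rewrite author's own statement) =====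
-- stated objective: alternative
-- what changed: B fuses A's two loops into one pass: it keeps a shrinking set of still-unmet query digits and discards each digit as it is peeled off the number (with early exit once the set is empty), instead of building the full digit list and re-scanning it per query digit.
import Mathlib
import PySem

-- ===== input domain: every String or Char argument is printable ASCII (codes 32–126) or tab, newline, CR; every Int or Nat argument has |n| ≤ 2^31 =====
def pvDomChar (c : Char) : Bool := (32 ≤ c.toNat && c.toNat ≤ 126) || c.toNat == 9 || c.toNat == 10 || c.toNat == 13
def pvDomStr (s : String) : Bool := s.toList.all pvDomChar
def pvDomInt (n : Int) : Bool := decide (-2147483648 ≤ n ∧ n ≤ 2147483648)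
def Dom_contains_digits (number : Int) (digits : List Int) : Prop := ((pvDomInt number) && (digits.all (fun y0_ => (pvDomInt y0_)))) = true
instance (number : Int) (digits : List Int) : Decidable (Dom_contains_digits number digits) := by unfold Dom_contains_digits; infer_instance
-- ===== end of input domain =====

-- B fuses A's build-digit-list-then-scan into one pass that discards each peeled digit from a set of unmet query digits (alternative decomposition, same behaviour).


-- used by both ports' termination
theorem pv_floordiv10_lt (n : Int) (h : 0 < n) :
    (PySem.Int.floordiv n 10).toNat < n.toNat := by
  rw [PySem.Int.floordiv_eq_ediv_of_pos (by norm_num)]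
  omega

-- ===== PORT A =====
-- the while loop: append number % 10, number //= 10
def cdPeelA (number : Int) (acc : List Int) : List Int :=
  if h : number > 0 then
    cdPeelA (PySem.Int.floordiv number 10) (acc ++ [PySem.Int.mod number 10])
  else acc
termination_by number.toNat
decreasing_by exact pv_floordiv10_lt number h

-- the for loop with break
def cdCheckA (digits : List Int) (number_digits : List Int) : Bool :=
  match digits with
  | [] => true
  | digit :: rest =>
    if !(number_digits.contains digit) then false
    else cdCheckA rest number_digits

def contains_digits (number : Int) (digits : List Int) : Bool :=
  cdCheckA digits (cdPeelA number [])

-- ===== PORT B =====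
-- while number > 0 and needed: needed.discard(number % 10); number //= 10
def cdLoopB (number : Int) (needed : PySem.Set Int) : PySem.Set Int :=
  if h : number > 0 ∧ needed ≠ [] then
    cdLoopB (PySem.Int.floordiv number 10) (PySem.Set.discard needed (PySem.Int.mod number 10))
  else needed
termination_by number.toNat
decreasing_by exact pv_floordiv10_lt number h.1

def contains_digits_alt (number : Int) (digits : List Int) : Bool :=
  (cdLoopB number (PySem.Set.ofList digits)).isEmpty

-- ===== PRECONDITION & SPEC =====
def Spec_contains_digits (number : Int) (digits : List Int) (out : Bool) : Prop := out = contains_digits_alt number digits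
instance (number : Int) (digits : List Int) (out : Bool) : Decidable (Spec_contains_digits number digits out) := by unfold Spec_contains_digits; infer_instance

-- ===== CLAIM (what is proved, stated in full; the proofs are below) =====
def Claim_equal_contains_digits : Prop := ∀ (number : Int) (digits : List Int), Dom_contains_digits number digits → Spec_contains_digits number digits (contains_digits number digits)

-- ===== LEMMAS AND PROOFS =====

-- the digit list of number (least significant first), proof-side characterisation
def cdDigits (number : Int) : List Int :=
  if h : number > 0 then
    PySem.Int.mod number 10 :: cdDigits (PySem.Int.floordiv number 10)
  else []
termination_by number.toNat
decreasing_by exact pv_floordiv10_lt number h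

theorem cdDigits_pos (n : Int) (h : 0 < n) :
    cdDigits n = PySem.Int.mod n 10 :: cdDigits (PySem.Int.floordiv n 10) := by
  rw [cdDigits, dif_pos h]

theorem cdDigits_nonpos (n : Int) (h : ¬ 0 < n) : cdDigits n = [] := by
  rw [cdDigits, dif_neg h]

theorem cdPeelA_eq (number : Int) (acc : List Int) :
    cdPeelA number acc = acc ++ cdDigits number := by
  induction number, acc using cdPeelA.induct with
  | case1 n acc h ih =>
      rw [cdPeelA, dif_pos h, ih, cdDigits_pos n h]
      simp
  | case2 n acc h =>
      rw [cdPeelA, dif_neg h, cdDigits_nonpos n h]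
      simp

theorem cdCheckA_iff (digits nd : List Int) :
    cdCheckA digits nd = true ↔ ∀ d ∈ digits, d ∈ nd := by
  induction digits with
  | nil => simp [cdCheckA]
  | cons d rest ih =>
      simp only [cdCheckA]
      by_cases h : nd.contains d
      · simp [h, ih]
      · simp [h]
        exact fun hc => absurd (by simpa using hc) (by simpa using h)

theorem cdLoopB_empty_iff (number : Int) (needed : PySem.Set Int) :
    cdLoopB number needed = [] ↔ ∀ x ∈ needed, x ∈ cdDigits number := by
  induction number, needed using cdLoopB.induct with
  | case1 n s h ih =>
      rw [cdLoopB, dif_pos h, ih, cdDigits_pos n h.1]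
      constructor
      · intro hsub x hx
        by_cases hxd : x = PySem.Int.mod n 10
        · exact List.mem_cons.mpr (Or.inl hxd)
        · exact List.mem_cons.mpr (Or.inr (hsub x ((PySem.Set.mem_discard _ _ _).mpr ⟨hx, hxd⟩)))
      · intro hsub x hx
        rw [PySem.Set.mem_discard _ _ _] at hx
        rcases (by simpa using hsub x hx.1 : x = PySem.Int.mod n 10 ∨ x ∈ cdDigits (PySem.Int.floordiv n 10)) with h1 | h2
        · exact absurd h1 hx.2
        · exact h2
  | case2 n s h =>
      rw [cdLoopB, dif_neg h]
      constructor
      · intro hs; subst hs; simp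
      · intro hsub
        by_cases hn : 0 < n
        · have : s = [] := by
            by_contra hne
            exact h ⟨hn, hne⟩
          exact this
        · rw [cdDigits_nonpos n hn] at hsub
          exact List.eq_nil_iff_forall_not_mem.mpr (fun x hx => by simpa using hsub x hx)

-- ===== VERDICT (by name: the statement is the Claim_ definition above) =====
theorem contains_digits_spec : Claim_equal_contains_digits := by
  intro number digits _
  unfold Spec_contains_digits contains_digits contains_digits_alt
  rw [cdPeelA_eq]
  simp only [List.nil_append]
  rw [Bool.eq_iff_iff, cdCheckA_iff, List.isEmpty_iff, cdLoopB_empty_iff]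
  constructor
  · intro h x hx
    exact h x (by simpa [PySem.Set.mem_ofList] using hx)
  · intro h d hd
    exact h d (by simpa [PySem.Set.mem_ofList] using hd)
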